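-- pv_equiv track=rewrite | github.com/aorursy/lost-nb | junheeshin_cipher3-level1.py | whitelen
-- ===== SOURCE A (Python) =====
-- def whitelen(s):
--     cnt=0
--     for n in s:
--         if not n.isalpha():
--             cnt+=1
--         elif n in ['z', 'Z']:
--             cnt+=1
--     return cnt
-- ===== SOURCE B (Python) =====
-- def whitelen(s):
--     return len(s) - sum(c.isalpha() for c in s) + s.count('z') + s.count('Z')
-- ===== Notes on version B (the rewrite author's own statement) =====
-- stated objective: simpler
-- what changed: Replaces the per-character branching loop by inclusion/exclusion: string length minus the alphabetic-character count plus the occurrence counts of the two counted letters, each computed as a separate aggregate (sum / str.count) and combined arithmetically.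
import Mathlib
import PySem

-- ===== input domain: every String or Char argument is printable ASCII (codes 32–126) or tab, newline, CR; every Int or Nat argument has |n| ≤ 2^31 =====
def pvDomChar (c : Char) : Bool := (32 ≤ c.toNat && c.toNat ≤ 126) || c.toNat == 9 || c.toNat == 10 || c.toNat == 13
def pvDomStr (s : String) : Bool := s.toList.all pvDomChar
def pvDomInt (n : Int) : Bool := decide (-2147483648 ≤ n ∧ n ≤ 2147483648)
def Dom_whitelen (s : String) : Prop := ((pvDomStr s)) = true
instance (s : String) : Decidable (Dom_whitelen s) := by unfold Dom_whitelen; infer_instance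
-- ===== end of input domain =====

-- B computes the same count by inclusion/exclusion (length - alpha-count + z-count + Z-count) instead of A's per-character branching loop; objective: simpler.


-- ===== PORT A =====
-- for n in s: if not n.isalpha(): cnt += 1 elif n in ['z','Z']: cnt += 1
def whitelen (s : String) : Int :=
  s.toList.foldl
    (fun cnt n =>
      if !(PySem.Chars.isalpha n) then cnt + 1
      else if ['z', 'Z'].contains n then cnt + 1
      else cnt)
    0

-- ===== PORT B =====
-- len(s) - sum(c.isalpha() for c in s) + s.count('z') + s.count('Z')
def whitelen_alt (s : String) : Int :=
  (PySem.Str.len s : Int)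
    - (s.toList.map (fun c => if PySem.Chars.isalpha c then (1 : Int) else 0)).sum
    + (PySem.Str.count s "z" : Int)
    + (PySem.Str.count s "Z" : Int)

-- ===== PRECONDITION & SPEC =====
def Spec_whitelen (s : String) (out : Int) : Prop := out = whitelen_alt s
instance (s : String) (out : Int) : Decidable (Spec_whitelen s out) := by unfold Spec_whitelen; infer_instance

-- ===== CLAIM (what is proved, stated in full; the proofs are below) =====
def Claim_equal_whitelen : Prop := ∀ (s : String), Dom_whitelen s → Spec_whitelen s (whitelen s)

-- ===== LEMMAS AND PROOFS =====

-- Python's str.count with a single-character needle is List.count.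
lemma count_go_singleton (c : Char) :
    ∀ (l : List Char) (fuel acc : Nat), l.length ≤ fuel →
      PySem.Chars.count.go [c] fuel l acc = acc + l.count c := by
  intro l
  induction l with
  | nil => intro fuel acc _; cases fuel <;> simp [PySem.Chars.count.go]
  | cons h t ih =>
      intro fuel acc hf
      cases fuel with
      | zero => simp at hf
      | succ f =>
          simp only [PySem.Chars.count.go, List.isPrefixOf, List.length_cons] at *
          by_cases hc : c = h
          · subst hc
            simp [ih f (acc + 1) (by omega)]
            omega
          · simp [hc, Ne.symm hc, ih f acc (by omega)]

lemma count_singleton (cs : List Char) (c : Char) :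
    PySem.Chars.count cs [c] = cs.count c := by
  simpa [PySem.Chars.count] using count_go_singleton c cs cs.length 0 le_rfl

lemma whitelen_foldl (cs : List Char) : ∀ (acc : Int),
    cs.foldl
      (fun cnt n =>
        if !(PySem.Chars.isalpha n) then cnt + 1
        else if ['z', 'Z'].contains n then cnt + 1
        else cnt)
      acc
    = acc + (cs.length : Int)
        - (cs.map (fun c => if PySem.Chars.isalpha c then (1 : Int) else 0)).sum
        + (cs.count 'z' : Int) + (cs.count 'Z' : Int) := by
  induction cs with
  | nil => intro acc; simp
  | cons h t ih =>
      intro acc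
      rw [List.foldl_cons, ih]
      simp only [List.map_cons, List.sum_cons, List.length_cons, List.count_cons]
      have hzA : PySem.Chars.isalpha 'z' = true := by decide
      have hZA : PySem.Chars.isalpha 'Z' = true := by decide
      by_cases ha : PySem.Chars.isalpha h = true
      · by_cases hz : h = 'z'
        · subst hz; simp [ha]; ring
        · by_cases hZ : h = 'Z'
          · subst hZ; simp [ha]; ring
          · simp [ha, hz, hZ]; ring
      · have hz : h ≠ 'z' := by rintro rfl; exact ha hzA
        have hZ : h ≠ 'Z' := by rintro rfl; exact ha hZA
        simp [ha, hz, hZ]; ring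

-- ===== VERDICT (by name: the statement is the Claim_ definition above) =====
theorem whitelen_spec : Claim_equal_whitelen := by
  intro s _
  show whitelen s = whitelen_alt s
  simp only [whitelen, whitelen_alt, PySem.Str.count, PySem.Str.len]
  rw [whitelen_foldl]
  simp [count_singleton]
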